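-- pv_equiv track=rewrite | github.com/Almax84/ComputerScienceDegree_ProgrammiFundamentals | Fondamenti_di_programmazione/homework2018/homework02/program01.py | find_colonne
-- ===== SOURCE A (Python) =====
-- def find_colonne(diagramma_upper):
--         lista_colonne = []
--         for j in range(len(diagramma_upper[0])):
--             colonna = []
--             colonna_string = ''
--             for i in range(len(diagramma_upper)):
--                 colonna.append(diagramma_upper[i][j])
--                 colonna_string = ''.join(colonna)
--             lista_colonne.append(colonna_string)
--         return lista_colonne
-- ===== SOURCE B (Python) =====
-- def find_colonne(diagramma_upper):
--     lista_colonne = ['' for _ in range(len(diagramma_upper[0]))]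
--     for riga in diagramma_upper:
--         for j in range(len(lista_colonne)):
--             lista_colonne[j] = lista_colonne[j] + riga[j]
--     return lista_colonne
-- ===== Notes on version B (the rewrite author's own statement) =====
-- stated objective: faster
-- what changed: Instead of rebuilding each column one at a time while re-joining the accumulated character list on every inner step, B preallocates one accumulator string per column and makes a single row-major pass appending riga[j] to column j, maintaining all columns in parallel.
import Mathlib
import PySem

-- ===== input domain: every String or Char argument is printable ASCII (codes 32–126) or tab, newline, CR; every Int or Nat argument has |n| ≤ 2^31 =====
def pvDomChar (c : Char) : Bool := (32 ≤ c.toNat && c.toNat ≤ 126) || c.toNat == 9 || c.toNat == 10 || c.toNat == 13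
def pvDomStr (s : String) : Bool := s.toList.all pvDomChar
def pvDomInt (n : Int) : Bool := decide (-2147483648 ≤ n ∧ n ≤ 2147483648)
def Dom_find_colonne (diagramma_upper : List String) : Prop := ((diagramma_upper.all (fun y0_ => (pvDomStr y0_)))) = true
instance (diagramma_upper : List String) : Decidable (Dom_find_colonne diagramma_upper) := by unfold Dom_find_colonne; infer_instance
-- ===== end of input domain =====

-- B replaces A's column-at-a-time rebuild (which re-joins the accumulated column on every inner
-- step) with a single row-major pass that grows all column accumulators in parallel.

-- ===== PORT A =====
def pvColChar (riga : String) (j : Int) : Char := (PySem.Str.pyGet? riga j).getD ' '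

def find_colonne (diagramma_upper : List String) : List String :=
  let n0 : Int := ((PySem.List.pyGetD diagramma_upper 0 "").toList.length : Int)
  (PySem.List.pyRange 0 n0 1).foldl
    (fun lista_colonne j =>
      let st := (PySem.List.pyRange 0 (diagramma_upper.length : Int) 1).foldl
        (fun (st : List Char × String) i =>
          let colonna := st.1 ++ [pvColChar (PySem.List.pyGetD diagramma_upper i "") j]
          (colonna, String.ofList colonna))
        ([], "")
      lista_colonne ++ [st.2])
    []

def find_colonne_alt (diagramma_upper : List String) : List String :=
  let n0 : Nat := (PySem.List.pyGetD diagramma_upper 0 "").toList.length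
  let cols := diagramma_upper.foldl
    (fun cols riga =>
      (PySem.List.pyRange 0 (n0 : Int) 1).foldl
        (fun cols j =>
          PySem.List.pySetD cols j (PySem.List.pyGetD cols j [] ++ [pvColChar riga j]))
        cols)
    (List.replicate n0 ([] : List Char))
  cols.map String.ofList


-- ===== PRECONDITION & SPEC =====
-- Pre_ excludes exactly the inputs on which the Python A raises IndexError:
-- the empty matrix (diagramma_upper[0]) and matrices with a row shorter than row 0 (diagramma_upper[i][j]).
def Pre_find_colonne (diagramma_upper : List String) : Prop :=
  diagramma_upper ≠ [] ∧
  ∀ s ∈ diagramma_upper, (diagramma_upper.headD "").toList.length ≤ s.toList.length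
instance (diagramma_upper : List String) : Decidable (Pre_find_colonne diagramma_upper) := by
  unfold Pre_find_colonne; infer_instance

def pvWitness_find_colonne : List String := (["ab", "cd"])

def Spec_find_colonne (diagramma_upper : List String) (out : List String) : Prop := out = find_colonne_alt diagramma_upper
instance (diagramma_upper : List String) (out : List String) : Decidable (Spec_find_colonne diagramma_upper out) := by unfold Spec_find_colonne; infer_instance

-- ===== CLAIM (what is proved, stated in full; the proofs are below) =====
def Claim_equal_find_colonne : Prop := ∀ (diagramma_upper : List String), Dom_find_colonne diagramma_upper → Pre_find_colonne diagramma_upper → Spec_find_colonne diagramma_upper (find_colonne diagramma_upper)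

-- ===== LEMMAS AND PROOFS =====
def pvCols (d : List String) : List String :=
  (List.range ((PySem.List.pyGetD d 0 "").toList.length)).map
    (fun k => String.ofList (d.map (fun r => r.toList.getD k ' ')))

lemma pvColChar_natCast (r : String) (k : Nat) :
    pvColChar r (k : Int) = r.toList.getD k ' ' := by
  simp [pvColChar, List.getD]

lemma pvPairFold (f : String → Char) (l : List String) (a : List Char) (s : String) :
    l.foldl (fun st r => (st.1 ++ [f r], String.ofList (st.1 ++ [f r]))) (a, s)
      = (a ++ l.map f, if l = [] then s else String.ofList (a ++ l.map f)) := by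
  induction l generalizing a s with
  | nil => simp
  | cons r t ih =>
    rw [List.foldl_cons, ih]
    rcases eq_or_ne t [] with rfl | ht
    · simp
    · simp [ht, List.append_assoc]

lemma find_colonne_eq_pvCols (d : List String) : find_colonne d = pvCols d := by
  rcases eq_or_ne d [] with rfl | hd
  · decide
  · unfold find_colonne pvCols
    simp only [PySem.List.foldl_append_singleton_eq_map]
    rw [PySem.List.pyRange_zero_nat ((PySem.List.pyGetD d 0 "").toList.length), List.map_map]
    apply List.map_congr_left
    intro k hk
    simp only [Function.comp]
    rw [PySem.List.foldl_pyRange_zero_pyGetD' d "" (fun (st : List Char × String) r =>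
      (st.1 ++ [pvColChar r (k : Int)], String.ofList (st.1 ++ [pvColChar r (k : Int)]))) ([], "")]
    rw [pvPairFold]
    simp [hd, pvColChar_natCast]

lemma pvSetMapRange {β : Type} (g : Nat → β) (n m : Nat) (v : β) (hm : m < n) :
    ((List.range n).map g).set m v
      = (List.range n).map (fun k => if k = m then v else g k) := by
  apply List.ext_getElem
  · simp
  · intro i h1 h2
    simp only [List.getElem_set, List.getElem_map, List.getElem_range]
    rcases eq_or_ne i m with rfl | h
    · simp
    · simp [h, Ne.symm h]

lemma pvInnerFold (riga : String) (n0 : Nat) (g : Nat → List Char) (m : Nat) (hm : m ≤ n0) :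
    (PySem.List.pyRange 0 (m : Int) 1).foldl
      (fun cols j => PySem.List.pySetD cols j (PySem.List.pyGetD cols j [] ++ [pvColChar riga j]))
      ((List.range n0).map g)
    = (List.range n0).map
        (fun k => if k < m then g k ++ [pvColChar riga (k : Int)] else g k) := by
  induction m with
  | zero => simp
  | succ m ih =>
    rw [show ((m + 1 : Nat) : Int) = (m : Int) + 1 by push_cast; ring,
        PySem.List.pyRange_one_succ_right (by positivity), List.foldl_append,
        ih (by omega), List.foldl_cons, List.foldl_nil,
        PySem.List.pySetD_natCast, PySem.List.pyGetD_natCast,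
        PySem.List.getD_map_range _ _ _ _ (by omega),
        pvSetMapRange _ _ _ _ (by omega)]
    apply List.map_congr_left
    intro k hk
    simp only [List.mem_range] at hk
    rcases eq_or_ne k m with rfl | hkm
    · simp
    · have : (k < m + 1) ↔ (k < m) := by omega
      simp [hkm, this]

lemma pvOuterFold (n0 : Nat) (l : List String) (g : Nat → List Char) :
    l.foldl
      (fun cols riga =>
        (PySem.List.pyRange 0 (n0 : Int) 1).foldl
          (fun cols j => PySem.List.pySetD cols j (PySem.List.pyGetD cols j [] ++ [pvColChar riga j]))
          cols)
      ((List.range n0).map g)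
    = (List.range n0).map (fun k => g k ++ l.map (fun r => r.toList.getD k ' ')) := by
  induction l generalizing g with
  | nil => simp
  | cons r t ih =>
    rw [List.foldl_cons, pvInnerFold r n0 g n0 le_rfl]
    have h1 : (List.range n0).map (fun k => if k < n0 then g k ++ [pvColChar r (k : Int)] else g k)
        = (List.range n0).map (fun k => g k ++ [pvColChar r (k : Int)]) := by
      apply List.map_congr_left
      intro k hk
      simp only [List.mem_range] at hk
      simp [hk]
    rw [h1, ih]
    apply List.map_congr_left
    intro k hk
    simp [pvColChar_natCast]

lemma find_colonne_alt_eq_pvCols (d : List String) : find_colonne_alt d = pvCols d := by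
  unfold find_colonne_alt pvCols
  simp only []
  have hrep : List.replicate ((PySem.List.pyGetD d 0 "").toList.length) ([] : List Char)
      = (List.range ((PySem.List.pyGetD d 0 "").toList.length)).map (fun _ => ([] : List Char)) := by
    simp [List.map_const']
  rw [hrep, pvOuterFold, List.map_map]
  simp


-- ===== VERDICT (by name: the statement is the Claim_ definition above) =====
theorem find_colonne_spec : Claim_equal_find_colonne := by
  intro d _ _
  unfold Spec_find_colonne
  rw [find_colonne_eq_pvCols, find_colonne_alt_eq_pvCols]
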